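-- pv_equiv track=rewrite | github.com/dofeng/CoarseRL2Mol | RL_MTCS/stage_branch.py | _build_alternating_path
-- ===== SOURCE A (Python) =====
-- from typing import List, Dict, Optional, Tuple, Set
--
-- def _build_alternating_path(start_q, start_r,
--                             first_step: Tuple[int, int],
--                             second_step: Tuple[int, int],
--                             length: int) -> List[Tuple[int, int]]:
--     coords: List[Tuple[int, int]] = []
--     cur_q, cur_r = start_q, start_r
--     for i in range(max(0, int(length))):
--         dq, dr = first_step if i % 2 == 0 else second_step
--         cur_q += dq
--         cur_r += dr
--         coords.append((cur_q, cur_r))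
--     return coords
-- ===== SOURCE B (Python) =====
-- def _build_alternating_path(start_q, start_r, first_step, second_step, length):
--     dq1, dr1 = first_step
--     dq2, dr2 = second_step
--     return [(start_q + (i // 2 + 1) * dq1 + ((i + 1) // 2) * dq2,
--              start_r + (i // 2 + 1) * dr1 + ((i + 1) // 2) * dr2)
--             for i in range(max(0, int(length)))]
-- ===== Notes on version B (the rewrite author's own statement) =====
-- stated objective: alternative
-- what changed: Replaces the running cur_q/cur_r accumulator loop with a closed-form list comprehension that computes each coordinate directly from its index via the counts of first/second steps taken (i//2+1 and (i+1)//2).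
import Mathlib
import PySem

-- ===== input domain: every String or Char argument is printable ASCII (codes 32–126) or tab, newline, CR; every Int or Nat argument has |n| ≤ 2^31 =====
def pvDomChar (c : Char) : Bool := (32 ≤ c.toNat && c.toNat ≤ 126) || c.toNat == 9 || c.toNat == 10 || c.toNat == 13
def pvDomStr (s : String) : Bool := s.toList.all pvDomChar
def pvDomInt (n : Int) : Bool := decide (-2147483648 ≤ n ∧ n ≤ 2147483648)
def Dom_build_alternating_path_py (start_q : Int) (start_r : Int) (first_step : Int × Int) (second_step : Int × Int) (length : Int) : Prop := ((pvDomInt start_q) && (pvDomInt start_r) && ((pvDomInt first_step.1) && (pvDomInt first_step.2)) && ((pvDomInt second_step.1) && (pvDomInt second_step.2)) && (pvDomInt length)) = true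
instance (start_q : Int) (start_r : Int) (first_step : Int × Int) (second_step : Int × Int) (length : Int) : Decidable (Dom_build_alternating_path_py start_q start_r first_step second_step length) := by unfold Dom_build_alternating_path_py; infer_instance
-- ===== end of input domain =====

-- B replaces A's running-accumulator loop with a closed-form per-index computation (alternative decomposition, same cost).

-- ===== PORT A =====
-- literal port: loop over range(max(0,length)) carrying (cur_q, cur_r, coords)
def build_alternating_path_py (start_q : Int) (start_r : Int) (first_step : Int × Int) (second_step : Int × Int) (length : Int) : List (Int × Int) :=
  let st := (List.range (max 0 length).toNat).foldl
    (fun (st : Int × Int × List (Int × Int)) i =>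
      let d := if i % 2 == 0 then first_step else second_step
      let cur_q := st.1 + d.1
      let cur_r := st.2.1 + d.2
      (cur_q, cur_r, st.2.2 ++ [(cur_q, cur_r)]))
    (start_q, start_r, [])
  st.2.2

-- ===== PORT B =====
def build_alternating_path_py_alt (start_q : Int) (start_r : Int) (first_step : Int × Int) (second_step : Int × Int) (length : Int) : List (Int × Int) :=
  let dq1 := first_step.1
  let dr1 := first_step.2
  let dq2 := second_step.1
  let dr2 := second_step.2
  (List.range (max 0 length).toNat).map
    (fun (i : Nat) => (start_q + ((i : Int) / 2 + 1) * dq1 + (((i : Int) + 1) / 2) * dq2,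
               start_r + ((i : Int) / 2 + 1) * dr1 + (((i : Int) + 1) / 2) * dr2))

-- ===== PRECONDITION & SPEC =====
def Spec_build_alternating_path_py (start_q : Int) (start_r : Int) (first_step : Int × Int) (second_step : Int × Int) (length : Int) (out : List (Int × Int)) : Prop := out = build_alternating_path_py_alt start_q start_r first_step second_step length
instance (start_q : Int) (start_r : Int) (first_step : Int × Int) (second_step : Int × Int) (length : Int) (out : List (Int × Int)) : Decidable (Spec_build_alternating_path_py start_q start_r first_step second_step length out) := by unfold Spec_build_alternating_path_py; infer_instance

-- ===== CLAIM (what is proved, stated in full; the proofs are below) =====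
def Claim_equal_build_alternating_path_py : Prop := ∀ (start_q : Int) (start_r : Int) (first_step : Int × Int) (second_step : Int × Int) (length : Int), Dom_build_alternating_path_py start_q start_r first_step second_step length → Spec_build_alternating_path_py start_q start_r first_step second_step length (build_alternating_path_py start_q start_r first_step second_step length)

-- ===== LEMMAS AND PROOFS =====

-- invariant: after n iterations the state is (closed-form position at n, map of closed forms)
theorem bap_foldl_inv (start_q start_r : Int) (fs ss : Int × Int) (n : Nat) :
    (List.range n).foldl
      (fun (st : Int × Int × List (Int × Int)) i =>
        let d := if i % 2 == 0 then fs else ss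
        let cur_q := st.1 + d.1
        let cur_r := st.2.1 + d.2
        (cur_q, cur_r, st.2.2 ++ [(cur_q, cur_r)]))
      (start_q, start_r, [])
    = (start_q + (((n : Int) + 1) / 2) * fs.1 + ((n : Int) / 2) * ss.1,
       start_r + (((n : Int) + 1) / 2) * fs.2 + ((n : Int) / 2) * ss.2,
       (List.range n).map
         (fun (i : Nat) => (start_q + ((i : Int) / 2 + 1) * fs.1 + (((i : Int) + 1) / 2) * ss.1,
                    start_r + ((i : Int) / 2 + 1) * fs.2 + (((i : Int) + 1) / 2) * ss.2))) := by
  induction n with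
  | zero => simp
  | succ n ih =>
    rw [List.range_succ, List.foldl_append, List.map_append, ih]
    simp only [List.foldl_cons, List.foldl_nil, List.map_cons, List.map_nil]
    by_cases h : n % 2 = 0
    · have h2 : ((n : Int) + 1 + 1) / 2 = (n : Int) / 2 + 1 := by omega
      have h3 : ((n : Int) + 1) / 2 = (n : Int) / 2 := by omega
      simp [h, h2, h3]
      and_intros <;> ring
    · have h1 : (n % 2 == 0) = false := by simp [h]
      have h2 : ((n : Int) + 1 + 1) / 2 = ((n : Int) + 1) / 2 := by omega
      have h3 : ((n : Int) + 1) / 2 = (n : Int) / 2 + 1 := by omega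
      simp [h1, h2, h3]
      and_intros <;> ring

-- ===== VERDICT (by name: the statement is the Claim_ definition above) =====
theorem build_alternating_path_py_spec : Claim_equal_build_alternating_path_py := by
  intro start_q start_r fs ss length _
  unfold Spec_build_alternating_path_py build_alternating_path_py build_alternating_path_py_alt
  simp only [bap_foldl_inv]
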